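-- pv_equiv track=rewrite | github.com/shreyysk/GoCubes | src/solver/kociemba_solver.py | _validate_cube_string
-- ===== SOURCE A (Python) =====
-- def _validate_cube_string(cube_string: str) -> bool:
--     """Validate cube string format"""
--     # Check length
--     if len(cube_string) != 54:
--         return False
--
--     # Check character counts
--     char_count = {}
--     for char in cube_string:
--         char_count[char] = char_count.get(char, 0) + 1
--
--     # Should have exactly 9 of each
--     for char in 'URFDLB':
--         if char_count.get(char, 0) != 9:
--             return False
--
--     return True
-- ===== SOURCE B (Python) =====
-- def _validate_cube_string(cube_string: str) -> bool:
--     """Validate cube string format"""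
--     # A valid cube string is exactly a rearrangement of nine of each face
--     # letter: compare the sorted string against the sorted canonical deck.
--     return sorted(cube_string) == sorted('URFDLB' * 9)
-- ===== Notes on version B (the rewrite author's own statement) =====
-- stated objective: alternative
-- what changed: Replaces the length guard plus per-character counting table with a sort-and-compare: the sorted input must equal the sorted canonical deck of nine of each face letter, which is equivalent because length 54 with nine of each face letter is exactly a permutation of that deck.
import Mathlib
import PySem

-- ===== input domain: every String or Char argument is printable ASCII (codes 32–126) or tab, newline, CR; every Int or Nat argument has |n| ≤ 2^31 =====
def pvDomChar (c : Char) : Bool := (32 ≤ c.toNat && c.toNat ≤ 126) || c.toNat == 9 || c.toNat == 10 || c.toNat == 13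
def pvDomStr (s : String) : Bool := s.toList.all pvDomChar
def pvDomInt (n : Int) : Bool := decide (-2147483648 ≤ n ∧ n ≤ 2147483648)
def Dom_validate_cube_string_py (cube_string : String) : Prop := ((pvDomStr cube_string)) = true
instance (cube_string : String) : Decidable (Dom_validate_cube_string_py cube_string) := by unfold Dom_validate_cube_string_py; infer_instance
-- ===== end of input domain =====

-- B replaces A's length guard + counting table with sort-and-compare against the canonical deck; objective: alternative.

-- ===== PORT A =====
def validate_cube_string_py (cube_string : String) : Bool :=
  if cube_string.toList.length ≠ 54 then false
  else
    -- char_count[char] = char_count.get(char, 0) + 1, one pass over the string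
    let char_count : PySem.Dict Char Int :=
      cube_string.toList.foldl (fun d ch => d.insert ch (d.getD ch 0 + 1)) PySem.Dict.empty
    -- for char in 'URFDLB': if char_count.get(char, 0) != 9: return False
    if "URFDLB".toList.any (fun ch => char_count.getD ch 0 ≠ 9) then false
    else true

-- ===== PORT B =====
def validate_cube_string_py_alt (cube_string : String) : Bool :=
  PySem.List.sorted cube_string.toList (fun x => x) false
    == PySem.List.sorted ((List.replicate 9 "URFDLB".toList).flatten) (fun x => x) false

-- ===== PRECONDITION & SPEC =====
def Spec_validate_cube_string_py (cube_string : String) (out : Bool) : Prop := out = validate_cube_string_py_alt cube_string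
instance (cube_string : String) (out : Bool) : Decidable (Spec_validate_cube_string_py cube_string out) := by unfold Spec_validate_cube_string_py; infer_instance

-- ===== CLAIM (what is proved, stated in full; the proofs are below) =====
def Claim_equal_validate_cube_string_py : Prop := ∀ (cube_string : String), Dom_validate_cube_string_py cube_string → Spec_validate_cube_string_py cube_string (validate_cube_string_py cube_string)

-- ===== LEMMAS AND PROOFS =====

set_option maxHeartbeats 1000000
set_option maxRecDepth 100000

-- the canonical deck 'URFDLB' * 9
def pvDeck : List Char := (List.replicate 9 "URFDLB".toList).flatten

-- A's dict lookup after the counting pass is the character count.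
theorem charCount_getD (s : List Char) (c : Char) :
    (s.foldl (fun d ch => d.insert ch (d.getD ch 0 + 1))
      (PySem.Dict.empty : PySem.Dict Char Int)).getD c 0 = (s.count c : Int) := by
  rw [PySem.Dict.getD_foldl_insert_add_one]
  simp

theorem cast_nine (n : Nat) : ((n : Int) = 9) ↔ (n = 9) := by exact_mod_cast Iff.rfl

-- the six face-letter counts sum to the count of face letters
theorem countP_six (l : List Char) :
    l.countP (fun c => c ∈ (['U','R','F','D','L','B'] : List Char)) =
      l.count 'U' + l.count 'R' + l.count 'F' + l.count 'D' + l.count 'L' + l.count 'B' := by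
  induction l with
  | nil => simp
  | cons x t ih =>
    simp only [List.countP_cons, List.count_cons, ih]
    by_cases h : x ∈ (['U','R','F','D','L','B'] : List Char)
    · fin_cases h <;> simp <;> omega
    · rw [if_neg (by simpa using h)]
      have h1 : ¬ x = 'U' := fun e => h (by simp [e])
      have h2 : ¬ x = 'R' := fun e => h (by simp [e])
      have h3 : ¬ x = 'F' := fun e => h (by simp [e])
      have h4 : ¬ x = 'D' := fun e => h (by simp [e])
      have h5 : ¬ x = 'L' := fun e => h (by simp [e])
      have h6 : ¬ x = 'B' := fun e => h (by simp [e])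
      simp [h1, h2, h3, h4, h5, h6]

theorem count_deck (a : Char) :
    pvDeck.count a = if a ∈ (['U','R','F','D','L','B'] : List Char) then 9 else 0 := by
  have h9 : pvDeck.count a = 9 * (("URFDLB".toList).count a) := by
    unfold pvDeck
    rw [List.count_flatten, List.map_replicate, List.sum_replicate, smul_eq_mul]
  rw [h9, show ("URFDLB".toList) = ['U','R','F','D','L','B'] from rfl]
  by_cases h : a ∈ (['U','R','F','D','L','B'] : List Char)
  · rw [if_pos h]; fin_cases h <;> rfl
  · rw [if_neg h, List.count_eq_zero.mpr h, mul_zero]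

-- the core equivalence: length 54 with nine of each face letter ↔ permutation of the deck
theorem perm_deck_iff (l : List Char) :
    l.Perm pvDeck ↔
      (l.length = 54 ∧ l.count 'U' = 9 ∧ l.count 'R' = 9 ∧ l.count 'F' = 9 ∧
       l.count 'D' = 9 ∧ l.count 'L' = 9 ∧ l.count 'B' = 9) := by
  constructor
  · intro hp
    refine ⟨by simpa using hp.length_eq, ?_, ?_, ?_, ?_, ?_, ?_⟩ <;>
      · rw [hp.count_eq, count_deck]; decide
  · rintro ⟨hlen, hU, hR, hF, hD, hL, hB⟩
    rw [List.perm_iff_count]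
    intro a
    by_cases h : a ∈ (['U','R','F','D','L','B'] : List Char)
    · rw [count_deck, if_pos h]
      fin_cases h <;> assumption
    · rw [count_deck, if_neg h, List.count_eq_zero]
      intro hmem
      -- all elements of l are face letters: the six counts already sum to the length
      have hsum : l.countP (fun c => c ∈ (['U','R','F','D','L','B'] : List Char)) = l.length := by
        rw [countP_six, hlen, hU, hR, hF, hD, hL, hB]
      exact h (by simpa using (List.countP_eq_length ..).mp hsum a hmem)

theorem A_true_iff (s : String) (hlen : s.toList.length = 54) :
    validate_cube_string_py s = true ↔
      (s.toList.count 'U' = 9 ∧ s.toList.count 'R' = 9 ∧ s.toList.count 'F' = 9 ∧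
       s.toList.count 'D' = 9 ∧ s.toList.count 'L' = 9 ∧ s.toList.count 'B' = 9) := by
  unfold validate_cube_string_py
  rw [if_neg (fun hne => hne hlen)]
  simp only [show ("URFDLB".toList) = ['U','R','F','D','L','B'] from rfl,
    List.any_cons, List.any_nil, Bool.or_false, charCount_getD]
  by_cases hU : s.toList.count 'U' = 9 <;> by_cases hR : s.toList.count 'R' = 9 <;>
    by_cases hF : s.toList.count 'F' = 9 <;> by_cases hD : s.toList.count 'D' = 9 <;>
    by_cases hL : s.toList.count 'L' = 9 <;> by_cases hB : s.toList.count 'B' = 9 <;>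
    simp [cast_nine, hU, hR, hF, hD, hL, hB]

theorem B_true_iff (s : String) :
    validate_cube_string_py_alt s = true ↔ s.toList.Perm pvDeck := by
  unfold validate_cube_string_py_alt
  rw [beq_iff_eq, show ((List.replicate 9 "URFDLB".toList).flatten) = pvDeck from rfl]
  exact PySem.List.sorted_id_eq_sorted_id_iff_perm ..

-- ===== VERDICT (by name: the statement is the Claim_ definition above) =====
theorem validate_cube_string_py_spec : Claim_equal_validate_cube_string_py := by
  intro s _
  unfold Spec_validate_cube_string_py
  have hB := (B_true_iff s).trans (perm_deck_iff s.toList)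
  by_cases hlen : s.toList.length = 54
  · have hA := A_true_iff s hlen
    cases hA' : validate_cube_string_py s <;> cases hB' : validate_cube_string_py_alt s <;>
      simp_all
  · have hAf : validate_cube_string_py s = false := by
      unfold validate_cube_string_py
      rw [if_pos hlen]
    have hBf : validate_cube_string_py_alt s = false :=
      Bool.eq_false_iff.mpr (fun h => hlen (hB.mp h).1)
    rw [hAf, hBf]
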